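-- pv_equiv track=rewrite | github.com/le-ar/agentiux-plugins | plugins/agentiux-dev/scripts/agentiux_dev_youtrack.py | _severity_weight
-- ===== SOURCE A (Python) =====
-- from typing import Any
--
-- def _severity_weight(value: Any) -> int:
--     text = str(value or "").lower()
--     if any(token in text for token in ("blocker", "critical", "showstopper")):
--         return 5
--     if any(token in text for token in ("major", "high", "severe")):
--         return 4
--     if any(token in text for token in ("normal", "medium")):
--         return 3
--     if any(token in text for token in ("minor", "low")):
--         return 2
--     return 1
-- ===== SOURCE B (Python) =====
-- _WEIGHTS = {
--     "blocker": 5, "critical": 5, "showstopper": 5,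
--     "major": 4, "high": 4, "severe": 4,
--     "normal": 3, "medium": 3,
--     "minor": 2, "low": 2,
-- }
--
-- def _severity_weight(value):
--     text = str(value or "").lower()
--     return max((w for tok, w in _WEIGHTS.items() if tok in text), default=1)
-- ===== Notes on version B (the rewrite author's own statement) =====
-- stated objective: simpler
-- what changed: Replaces the four-branch short-circuit ladder with one flat token-to-weight table and a single max-scan over it (default 1), valid because the table's weights realise the ladder's descending priority.
import Mathlib
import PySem

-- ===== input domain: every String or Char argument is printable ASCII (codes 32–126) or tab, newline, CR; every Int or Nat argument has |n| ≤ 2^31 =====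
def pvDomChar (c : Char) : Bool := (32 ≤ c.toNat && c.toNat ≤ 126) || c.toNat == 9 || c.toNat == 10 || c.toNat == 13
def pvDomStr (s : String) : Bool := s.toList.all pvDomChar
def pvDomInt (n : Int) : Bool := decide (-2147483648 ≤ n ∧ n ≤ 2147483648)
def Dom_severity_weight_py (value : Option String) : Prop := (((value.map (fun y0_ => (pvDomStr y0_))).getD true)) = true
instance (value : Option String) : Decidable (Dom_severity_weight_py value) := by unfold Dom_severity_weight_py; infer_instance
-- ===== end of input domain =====

-- ===== PORT A =====
-- B: flat token->weight table with one max-scan, instead of A's four-branch ladder (simpler; same cost).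
def severity_weight_py (value : Option String) : Int :=
  let text := PySem.Str.lower (value.getD "")
  if (["blocker", "critical", "showstopper"].any (fun t => PySem.Str.isIn t text)) then 5
  else if (["major", "high", "severe"].any (fun t => PySem.Str.isIn t text)) then 4
  else if (["normal", "medium"].any (fun t => PySem.Str.isIn t text)) then 3
  else if (["minor", "low"].any (fun t => PySem.Str.isIn t text)) then 2
  else 1

-- ===== PORT B =====
def sevWeights : List (String × Int) :=
  [("blocker", 5), ("critical", 5), ("showstopper", 5),
   ("major", 4), ("high", 4), ("severe", 4),
   ("normal", 3), ("medium", 3),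
   ("minor", 2), ("low", 2)]

def severity_weight_py_alt (value : Option String) : Int :=
  let text := PySem.Str.lower (value.getD "")
  sevWeights.foldl (fun m p => if PySem.Str.isIn p.1 text then max m p.2 else m) 1

-- ===== PRECONDITION & SPEC =====
def Spec_severity_weight_py (value : Option String) (out : Int) : Prop := out = severity_weight_py_alt value
instance (value : Option String) (out : Int) : Decidable (Spec_severity_weight_py value out) := by unfold Spec_severity_weight_py; infer_instance

-- ===== CLAIM (what is proved, stated in full; the proofs are below) =====
def Claim_equal_severity_weight_py : Prop := ∀ (value : Option String), Dom_severity_weight_py value → Spec_severity_weight_py value (severity_weight_py value)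

-- ===== LEMMAS AND PROOFS =====

-- ===== VERDICT (by name: the statement is the Claim_ definition above) =====
theorem severity_weight_py_spec : Claim_equal_severity_weight_py := by
  intro value _
  unfold Spec_severity_weight_py severity_weight_py severity_weight_py_alt sevWeights
  simp only [List.any_cons, List.any_nil, List.foldl_cons, List.foldl_nil, Bool.or_false]
  generalize PySem.Str.isIn "blocker" _ = b1
  generalize PySem.Str.isIn "critical" _ = b2
  generalize PySem.Str.isIn "showstopper" _ = b3
  generalize PySem.Str.isIn "major" _ = b4
  generalize PySem.Str.isIn "high" _ = b5
  generalize PySem.Str.isIn "severe" _ = b6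
  generalize PySem.Str.isIn "normal" _ = b7
  generalize PySem.Str.isIn "medium" _ = b8
  generalize PySem.Str.isIn "minor" _ = b9
  generalize PySem.Str.isIn "low" _ = b10
  revert b1 b2 b3 b4 b5 b6 b7 b8 b9 b10
  decide
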